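-- pv_equiv track=rewrite | github.com/drio18/cgap-gene-annotation | cgap_gene_annotation/src/tests/test_merge.py | new_to_existing_primary_edges
-- ===== SOURCE A (Python) =====
-- def new_to_existing_primary_edges(remove_fields=None):
--     """Expected mapping of new to existing annotations based upon test
--     constants EXISTING_ANNOTATION and NEW_ANNOTATION.
--
--     Not a fixture to allow customization and call within paramtrize.
--     """
--     edges = {1: {1, 7}, 2: {1, 2, 7}, 3: {3, 4, 5}, 4: {5}, 5: {6}}
--     if remove_fields:
--         for field in remove_fields:
--             if field in edges:
--                 del edges[field]
--             for value in edges.values():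
--                 if field in value:
--                     value.remove(field)
--     return edges
-- ===== SOURCE B (Python) =====
-- def new_to_existing_primary_edges(remove_fields=None):
--     remove = set(remove_fields or ())
--     base = {1: {1, 7}, 2: {1, 2, 7}, 3: {3, 4, 5}, 4: {5}, 5: {6}}
--     return {k: {v for v in vals if v not in remove}
--             for k, vals in base.items() if k not in remove}
-- ===== Notes on version B (the rewrite author's own statement) =====
-- stated objective: simpler
-- what changed: Replaces the loop over remove_fields with in-place del/remove (rescanning all dict values per field) by one filtering dict comprehension over the fixed base mapping against a precomputed removal set.
import Mathlib
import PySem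

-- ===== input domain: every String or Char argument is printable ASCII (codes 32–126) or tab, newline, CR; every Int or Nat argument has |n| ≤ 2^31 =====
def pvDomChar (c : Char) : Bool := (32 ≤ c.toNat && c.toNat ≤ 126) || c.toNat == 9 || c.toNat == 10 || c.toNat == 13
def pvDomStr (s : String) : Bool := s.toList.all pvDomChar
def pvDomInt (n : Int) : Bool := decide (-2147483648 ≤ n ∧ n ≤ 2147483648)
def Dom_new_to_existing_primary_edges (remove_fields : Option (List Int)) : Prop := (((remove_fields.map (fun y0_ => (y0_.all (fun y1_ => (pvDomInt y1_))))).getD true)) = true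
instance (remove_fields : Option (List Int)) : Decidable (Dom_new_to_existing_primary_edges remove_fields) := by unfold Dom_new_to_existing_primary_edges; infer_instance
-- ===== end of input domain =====

-- B replaces A's loop over remove_fields with in-place del/remove by one filtering
-- comprehension over the fixed base mapping (objective: simpler).
-- The fixed base mapping {1:{1,7}, 2:{1,2,7}, 3:{3,4,5}, 4:{5}, 5:{6}} (sets in Python's
-- small-int iteration order), shared data of both ports.
def pvEdgesBase : List (Int × List Int) :=
  [(1, [1, 7]), (2, [1, 2, 7]), (3, [3, 4, 5]), (4, [5]), (5, [6])]

-- ===== PORT A =====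
-- body of A's 'for field in remove_fields' loop: 'if field in edges: del edges[field]'
-- then 'for value in edges.values(): if field in value: value.remove(field)'
-- (dict del = drop the pair with that key; set.remove = List.erase, exact on nodup values)
def pvStepA (e : List (Int × List Int)) (field : Int) : List (Int × List Int) :=
  let e1 := if e.any (fun kv => kv.1 == field) then e.filter (fun kv => kv.1 ≠ field) else e
  e1.map (fun kv => if field ∈ kv.2 then (kv.1, kv.2.erase field) else kv)

def new_to_existing_primary_edges (remove_fields : Option (List Int)) : List (Int × List Int) :=
  let edges := pvEdgesBase
  match remove_fields with
  | none => edges                      -- 'if remove_fields:' false for None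
  | some fs => if fs.isEmpty then edges else fs.foldl pvStepA edges

-- ===== PORT B =====
def new_to_existing_primary_edges_alt (remove_fields : Option (List Int)) : List (Int × List Int) :=
  let r := remove_fields.getD []       -- remove = set(remove_fields or ())
  pvEdgesBase.filterMap (fun kv =>
    if kv.1 ∈ r then none else some (kv.1, kv.2.filter (fun v => v ∉ r)))

-- ===== PRECONDITION & SPEC =====
def Spec_new_to_existing_primary_edges (remove_fields : Option (List Int)) (out : List (Int × List Int)) : Prop := out = new_to_existing_primary_edges_alt remove_fields
instance (remove_fields : Option (List Int)) (out : List (Int × List Int)) : Decidable (Spec_new_to_existing_primary_edges remove_fields out) := by unfold Spec_new_to_existing_primary_edges; infer_instance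

-- ===== CLAIM (what is proved, stated in full; the proofs are below) =====
def Claim_equal_new_to_existing_primary_edges : Prop := ∀ (remove_fields : Option (List Int)), Dom_new_to_existing_primary_edges remove_fields → Spec_new_to_existing_primary_edges remove_fields (new_to_existing_primary_edges remove_fields)

-- ===== LEMMAS AND PROOFS =====

-- A's loop body, written as a single filter-then-map pass (the 'any' guard is redundant:
-- when no key matches, the filter is the identity).
theorem stepA_eq (e : List (Int × List Int)) (f : Int) :
    pvStepA e f =
      (e.filter (fun kv => kv.1 ≠ f)).map
        (fun kv => if f ∈ kv.2 then (kv.1, kv.2.erase f) else kv) := by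
  unfold pvStepA
  split
  · rfl
  · next h =>
    have h' : ∀ kv ∈ e, decide (kv.1 ≠ f) = true := by
      simp only [List.any_eq_true, beq_iff_eq, not_exists, not_and] at h
      intro kv hkv; simpa using h kv hkv
    rw [List.filter_eq_self.2 h']

-- On a duplicate-free value set, Python's value.remove(f) followed by later filtering
-- by fs equals filtering by f :: fs in one go.
theorem val_step (f : Int) (fs : List Int) (l : List Int) (h : l.Nodup) :
    (if f ∈ l then l.erase f else l).filter (fun v => v ∉ fs)
      = l.filter (fun v => v ∉ (f :: fs)) := by
  have h1 : (if f ∈ l then l.erase f else l) = l.filter (fun v => v != f) := by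
    split
    · exact h.erase_eq_filter f
    · next hf =>
      symm; apply List.filter_eq_self.2
      intro v hv; simp only [bne_iff_ne, ne_eq]
      rintro rfl; exact hf hv
  rw [h1, List.filter_filter]
  refine List.filter_congr ?_
  intro v _
  by_cases hvf : v = f <;> by_cases hvs : v ∈ fs <;> simp [hvf, hvs]

-- the result of filtering the state by a removed-field list fs
def pvFiltered (fs : List Int) (e : List (Int × List Int)) : List (Int × List Int) :=
  e.filterMap (fun kv => if kv.1 ∈ fs then none else some (kv.1, kv.2.filter (fun v => v ∉ fs)))

theorem step_filtered (f : Int) (fs : List Int) (e : List (Int × List Int))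
    (h : ∀ kv ∈ e, kv.2.Nodup) :
    pvFiltered fs (pvStepA e f) = pvFiltered (f :: fs) e := by
  rw [stepA_eq]
  induction e with
  | nil => rfl
  | cons kv tl ih =>
    have hkv : kv.2.Nodup := h kv (by simp)
    have htl : ∀ p ∈ tl, p.2.Nodup := fun p hp => h p (List.mem_cons_of_mem _ hp)
    have ih' := ih htl
    have hfst : (if f ∈ kv.2 then (kv.1, kv.2.erase f) else kv)
        = (kv.1, if f ∈ kv.2 then kv.2.erase f else kv.2) := by split <;> rfl
    have hv := val_step f fs kv.2 hkv
    simp only [pvFiltered] at ih' ⊢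
    simp at ih' hv
    by_cases hk : kv.1 = f
    · simp [hk, ih']
    · by_cases hmem : kv.1 ∈ fs
      · simp [hk, hmem, hfst, ih']
      · simp [hk, hmem, hfst, hv, ih']

theorem stepA_nodup (e : List (Int × List Int)) (f : Int)
    (h : ∀ kv ∈ e, kv.2.Nodup) : ∀ kv ∈ pvStepA e f, kv.2.Nodup := by
  rw [stepA_eq]
  intro kv hkv
  simp only [List.mem_map, List.mem_filter] at hkv
  obtain ⟨p, ⟨hp, -⟩, rfl⟩ := hkv
  split
  · exact (h p hp).erase f
  · exact h p hp

theorem foldl_stepA (fs : List Int) (e : List (Int × List Int))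
    (h : ∀ kv ∈ e, kv.2.Nodup) :
    fs.foldl pvStepA e = pvFiltered fs e := by
  induction fs generalizing e with
  | nil =>
    simp [pvFiltered]
  | cons f tl ih =>
    rw [List.foldl_cons, ih (pvStepA e f) (stepA_nodup e f h), step_filtered f tl e h]

-- ===== VERDICT (by name: the statement is the Claim_ definition above) =====
theorem new_to_existing_primary_edges_spec : Claim_equal_new_to_existing_primary_edges := by
  intro remove_fields _
  unfold Spec_new_to_existing_primary_edges new_to_existing_primary_edges new_to_existing_primary_edges_alt
  match remove_fields with
  | none => decide
  | some fs =>
    by_cases hfs : fs.isEmpty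
    · have : fs = [] := List.isEmpty_iff.mp hfs
      subst this; decide
    · simp only [if_neg hfs, Option.getD_some]
      rw [foldl_stepA fs pvEdgesBase (by decide)]
      rfl
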